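-- pv_equiv track=rewrite | github.com/lilypond/lilypond | scripts/midi2ly.py | get_voice_layout
-- ===== SOURCE A (Python) =====
-- def lst_append(lst, x):
--     lst.append(x)
--     return lst
--
-- def get_voice_layout(average_pitch):
--     d = {}
--     for i in range(len(average_pitch)):
--         d[average_pitch[i]] = lst_append(d.get(average_pitch[i], []), i)
--     s = list(reversed(sorted(average_pitch)))
--     non_empty = len([x for x in s if x])
--     names = ['One', 'Two']
--     if non_empty > 2:
--         names = ['One', 'Three', 'Four', 'Two']
--     layout = ['' for x in range(len(average_pitch))]
--     for i, n in zip(s, names):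
--         if i:
--             v = d[i]
--             if isinstance(v, list):
--                 d[i] = v[1:]
--                 v = v[0]
--             layout[v] = n
--     return layout
-- ===== SOURCE B (Python) =====
-- def get_voice_layout(average_pitch):
--     # rank-based: each position's name is indexed by its rank in the stable
--     # descending order: (# strictly greater pitches) + (# equal pitches before it)
--     non_empty = sum(1 for x in average_pitch if x)
--     names = ['One', 'Three', 'Four', 'Two'] if non_empty > 2 else ['One', 'Two']
--     s = sorted(average_pitch, reverse=True)
--     first = {}
--     for k, x in enumerate(s):
--         if x not in first:
--             first[x] = k
--     seen = {}
--     layout = []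
--     for x in average_pitch:
--         r = first[x] + seen.get(x, 0)
--         seen[x] = seen.get(x, 0) + 1
--         layout.append(names[r] if x and r < len(names) else '')
--     return layout
-- ===== Notes on version B (the rewrite author's own statement) =====
-- stated objective: alternative
-- what changed: Replaces A's dict-of-index-lists popped from the front of the descending sort by a per-position rank computation: the rank of each position is its value's first index in the descending sort plus a running count of equal values seen so far, and that rank indexes the name table directly; the layout is built in input order with no popping and no in-place slot assignment.
import Mathlib
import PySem

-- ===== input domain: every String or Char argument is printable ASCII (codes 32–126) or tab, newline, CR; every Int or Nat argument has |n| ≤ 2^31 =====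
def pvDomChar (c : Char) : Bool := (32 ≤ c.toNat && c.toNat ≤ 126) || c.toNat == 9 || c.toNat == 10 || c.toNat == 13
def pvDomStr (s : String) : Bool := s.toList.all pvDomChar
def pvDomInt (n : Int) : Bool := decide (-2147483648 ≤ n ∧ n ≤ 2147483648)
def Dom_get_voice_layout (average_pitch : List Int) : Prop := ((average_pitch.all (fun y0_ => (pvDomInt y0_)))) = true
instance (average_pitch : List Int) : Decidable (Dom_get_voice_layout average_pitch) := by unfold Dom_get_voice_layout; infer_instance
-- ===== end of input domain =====

-- B replaces A's dict-of-index-lists popped from the front of the descending sort by a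
-- per-position rank (first index of the value in the descending sort + running count of
-- equal values seen), building the layout in input order (alternative decomposition).

-- ===== PORT A =====
def get_voice_layout (average_pitch : List Int) : List String :=
  let d : PySem.Dict Int (List Int) :=
    (PySem.List.pyRange 0 (PySem.List.len average_pitch) 1).foldl
      (fun d i =>
        let x := PySem.List.pyGetD average_pitch i 0
        d.insert x (d.getD x [] ++ [i]))
      PySem.Dict.empty
  let s := (PySem.List.sorted average_pitch (fun x => x) false).reverse
  let non_empty := (s.filter (fun x => decide (x ≠ 0))).length
  let names := if non_empty > 2 then ["One", "Three", "Four", "Two"] else ["One", "Two"]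
  let layout := (PySem.List.pyRange 0 (PySem.List.len average_pitch) 1).map (fun _ => "")
  let st := (s.zip names).foldl
      (fun (st : PySem.Dict Int (List Int) × List String) p =>
        if p.1 ≠ 0 then
          let v := st.1.getD p.1 []
          let d' := st.1.insert p.1 (PySem.List.slice v (some 1) none)
          let v0 := PySem.List.pyGetD v 0 0
          (d', PySem.List.pySetD st.2 v0 p.2)
        else st)
      (d, layout)
  st.2

-- ===== PORT B =====
def get_voice_layout_alt (average_pitch : List Int) : List String :=
  let non_empty := average_pitch.countP (fun x => decide (x ≠ 0))
  let names := if non_empty > 2 then ["One", "Three", "Four", "Two"] else ["One", "Two"]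
  let s := PySem.List.sorted average_pitch (fun x => x) true
  let first := (PySem.List.enumerate s 0).foldl
      (fun (d : PySem.Dict Int Int) p =>
        if d.contains p.2 then d else d.insert p.2 p.1)
      PySem.Dict.empty
  let st := average_pitch.foldl
      (fun (st : PySem.Dict Int Int × List String) x =>
        let r := first.getD x 0 + st.1.getD x 0
        let seen' := st.1.insert x (st.1.getD x 0 + 1)
        (seen', st.2 ++ [if x ≠ 0 ∧ r < PySem.List.len names then
          PySem.List.pyGetD names r "" else ""]))
      (PySem.Dict.empty, [])
  st.2

-- ===== PRECONDITION & SPEC =====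
def Spec_get_voice_layout (average_pitch : List Int) (out : List String) : Prop := out = get_voice_layout_alt average_pitch
instance (average_pitch : List Int) (out : List String) : Decidable (Spec_get_voice_layout average_pitch out) := by unfold Spec_get_voice_layout; infer_instance

-- ===== CLAIM (what is proved, stated in full; the proofs are below) =====
def Claim_equal_get_voice_layout : Prop := ∀ (average_pitch : List Int), Dom_get_voice_layout average_pitch → Spec_get_voice_layout average_pitch (get_voice_layout average_pitch)

-- ===== LEMMAS AND PROOFS =====

-- s = list(reversed(sorted(l)))
def pvS (l : List Int) : List Int := (PySem.List.sorted l (fun x => x) false).reverse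
-- the predicate "l[j] == x" on indices
def pvPx (l : List Int) (x : Int) : Nat → Bool := fun j => decide (l.getD j 0 = x)
-- ascending list of the indices holding value x
def pvIdxs (l : List Int) (x : Int) : List Nat := (List.range l.length).filter (pvPx l x)
-- how many indices of value x have been popped after k loop steps of A
def pvPc (l : List Int) (x : Int) (k : Nat) : Nat := if x = 0 then 0 else ((pvS l).take k).count x
-- B's rank of index i: # strictly greater values + # equal values at smaller index
def pvRank (average_pitch : List Int) (i : Nat) : Nat :=
  average_pitch.countP (fun v => decide (average_pitch.getD i 0 < v))
    + (List.range i).countP (fun j => decide (average_pitch.getD j 0 = average_pitch.getD i 0))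
-- the value of layout[i] after k loop steps of A
def pvCond (l : List Int) (names : List String) (i : Nat) (k : Nat) : String :=
  if l.getD i 0 ≠ 0 ∧ pvRank l i < k then names.getD (pvRank l i) "" else ""
-- the name table, as B computes it
def pvNames (l : List Int) : List String :=
  if l.countP (fun x => decide (x ≠ 0)) > 2 then ["One", "Three", "Four", "Two"]
  else ["One", "Two"]

theorem pvS_perm (l : List Int) : (pvS l).Perm l :=
  (List.reverse_perm _).trans (PySem.List.sorted_perm l (fun x => x) false)

theorem pvS_pairwise (l : List Int) : (pvS l).Pairwise (fun a b => b ≤ a) := by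
  rw [pvS, List.pairwise_reverse]
  exact PySem.List.sorted_pairwise l (fun x => x)

theorem pvCountSplit (t : List Int) (x : Int) :
    t.countP (fun v => decide (x ≤ v)) = t.countP (fun v => decide (x < v)) + t.count x := by
  induction t with
  | nil => simp
  | cons a t ih =>
    simp only [List.countP_cons, List.count_cons, ih, beq_iff_eq]
    rcases lt_trichotomy x a with h | h | h
    · simp [h, h.le, h.ne']; omega
    · simp [h]; omega
    · simp [h.ne, not_le.mpr h, not_lt.mpr h.le]

theorem pvInitSeg (p : Int → Bool) (hp : ∀ a b : Int, b ≤ a → p b = true → p a = true) :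
    ∀ (s : List Int), s.Pairwise (fun a b => b ≤ a) → ∀ j (hj : j < s.length),
      (p s[j] = true ↔ j < s.countP p) := by
  intro s hs
  induction s with
  | nil => intro j hj; simp at hj
  | cons a t ih =>
    rw [List.pairwise_cons] at hs
    obtain ⟨ha, ht⟩ := hs
    have hz : p a = false → t.countP p = 0 := by
      intro hfa
      rw [List.countP_eq_zero]
      intro b hb hpb
      have := hp a b (ha b hb) hpb
      rw [hfa] at this; exact absurd this (by simp)
    intro j hj
    cases j with
    | zero =>
      simp only [List.getElem_cons_zero, List.countP_cons]
      by_cases hpa : p a = true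
      · simp [hpa]
      · rw [hz (by simpa using hpa)]
        simp [hpa]
    | succ j =>
      have hjt : j < t.length := by simpa using hj
      simp only [List.getElem_cons_succ, List.countP_cons]
      by_cases hpa : p a = true
      · rw [ih ht j hjt]
        simp [hpa]
      · have h0 := hz (by simpa using hpa)
        have hnp : ¬ (p t[j] = true) := by
          intro hpj
          have : 0 < t.countP p := List.countP_pos_iff.mpr ⟨t[j], List.getElem_mem _, hpj⟩
          omega
        simp [hpa, h0, hnp]

theorem pvChar (l : List Int) (j : Nat) (hj : j < (pvS l).length) (x : Int) :
    (pvS l)[j] = x ↔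
      (pvS l).countP (fun v => decide (x < v)) ≤ j ∧
      j < (pvS l).countP (fun v => decide (x < v)) + (pvS l).count x := by
  have h1 := pvInitSeg (fun v => decide (x < v)) (by intro a b hab hb; simp at *; omega)
      (pvS l) (pvS_pairwise l) j hj
  have h2 := pvInitSeg (fun v => decide (x ≤ v)) (by intro a b hab hb; simp at *; omega)
      (pvS l) (pvS_pairwise l) j hj
  rw [pvCountSplit] at h2
  simp only [decide_eq_true_eq] at h1 h2
  constructor
  · intro h; rw [h] at h1 h2; omega
  · intro h
    have hlt : ¬ (x < (pvS l)[j]) := by omega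
    have hle : x ≤ (pvS l)[j] := by rw [h2]; omega
    omega

theorem pvTakeCount : ∀ (s : List Int), s.Pairwise (fun a b => b ≤ a) →
    ∀ (k : Nat) (hk : k < s.length) (x : Int), s[k] = x →
      (s.take k).count x = k - s.countP (fun v => decide (x < v)) := by
  intro s hs
  induction s with
  | nil => intro k hk; simp at hk
  | cons a t ih =>
    rw [List.pairwise_cons] at hs
    obtain ⟨ha, ht⟩ := hs
    intro k hk x hx
    cases k with
    | zero => simp
    | succ k =>
      have hkt : k < t.length := by simpa using hk
      have hxt : t[k] = x := by simpa using hx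
      have hxa : x ≤ a := hxt ▸ ha t[k] (List.getElem_mem _)
      have ihk := ih ht k hkt x hxt
      have hcle : t.countP (fun v => decide (x < v)) ≤ k := by
        by_contra hcon
        rw [Nat.not_le] at hcon
        have := pvInitSeg (fun v => decide (x < v)) (by intro a b hab hb; simp at *; omega)
            t ht k hkt
        simp only [decide_eq_true_eq] at this
        have := this.mpr hcon
        omega
      simp only [List.take_succ_cons, List.count_cons, List.countP_cons, ihk]
      rcases lt_trichotomy x a with h | h | h
      · simp [h, (ne_of_lt h).symm]
      · subst h
        have hct : t.countP (fun v => decide (x < v)) = 0 := by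
          rw [List.countP_eq_zero]
          intro b hb
          simp only [decide_eq_true_eq, not_lt]
          exact ha b hb
        simp [hct] at ihk ⊢
        try omega
      · omega

theorem pvGetCount : ∀ (l : List Int) (x : Int),
    (List.range l.length).countP (pvPx l x) = l.count x := by
  intro l
  induction l with
  | nil => simp
  | cons a t ih =>
    intro x
    have : (List.range (a :: t).length) = 0 :: (List.range t.length).map Nat.succ := by
      simp [List.range_succ_eq_map]
    rw [this, List.countP_cons, List.countP_map]
    have : ((pvPx (a :: t) x) ∘ Nat.succ) = pvPx t x := by
      funext j; simp [pvPx]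
    rw [this, ih]
    simp only [pvPx, List.count_cons, beq_iff_eq, List.getD_cons_zero]
    by_cases h : a = x <;> simp [h]

theorem pvRangeFilterPos (p : Nat → Bool) : ∀ (n i : Nat), i < n → p i = true →
    ((List.range n).filter p)[(List.range i).countP p]? = some i := by
  intro n
  induction n with
  | zero => intro i hi; omega
  | succ n ih =>
    intro i hi hp
    rw [List.range_succ, List.filter_append]
    rcases Nat.lt_or_ge i n with h | h
    · have := ih i h hp
      have hlt : (List.range i).countP p < ((List.range n).filter p).length :=
        (List.getElem?_eq_some_iff.mp this).1
      rw [List.getElem?_append_left hlt]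
      exact ih i h hp
    · have hi' : i = n := by omega
      subst hi'
      simp only [List.filter_singleton, hp]
      rw [List.getElem?_append_right ?_]
      · have : (List.range i).countP p = ((List.range i).filter p).length := List.countP_eq_length_filter
        simp [this]
      · rw [List.countP_eq_length_filter]

theorem pvRangeFilterGet (p : Nat → Bool) (n : Nat) (P i : Nat)
    (h : ((List.range n).filter p)[P]? = some i) :
    (List.range i).countP p = P := by
  have hmem : i ∈ (List.range n).filter p := List.mem_of_getElem? h
  rw [List.mem_filter, List.mem_range] at hmem
  have h2 := pvRangeFilterPos p n i hmem.1 hmem.2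
  have hnd : ((List.range n).filter p).Nodup := (List.nodup_range).filter p
  obtain ⟨ha, hga⟩ := List.getElem?_eq_some_iff.mp h2
  obtain ⟨hb, hgb⟩ := List.getElem?_eq_some_iff.mp h
  exact List.Nodup.getElem_inj_iff hnd |>.mp (hga.trans hgb.symm)

theorem pvSetMapRange {α : Type} (f : Nat → α) (n i0 : Nat) (y : α) (_h : i0 < n) :
    ((List.range n).map f).set i0 y
      = (List.range n).map (fun i => if i = i0 then y else f i) := by
  apply List.ext_getElem
  · simp
  · intro k h1 h2
    simp only [List.getElem_set, List.getElem_map, List.getElem_range]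
    by_cases hk : k = i0
    · simp [hk]
    · simp only [hk, if_false]
      rw [if_neg (fun hc => hk hc.symm)]


theorem pvDictBuild (l : List Int) : ∀ (m : Nat) (x : Int),
    (((List.range m).foldl
        (fun (d : PySem.Dict Int (List Int)) (i : Nat) =>
          d.insert (l.getD i 0) (d.getD (l.getD i 0) [] ++ [(i : Int)]))
        PySem.Dict.empty).getD x [])
      = List.map (fun j : Nat => (j : Int)) ((List.range m).filter (pvPx l x)) := by
  intro m
  induction m with
  | zero => intro x; rfl
  | succ m ih =>
    intro x
    rw [List.range_succ, List.foldl_append, List.filter_append]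
    simp only [List.foldl_cons, List.foldl_nil, List.filter_singleton]
    by_cases h : l.getD m 0 = x
    · subst h
      rw [PySem.Dict.getD_insert_self, ih]
      have hp : pvPx l (l.getD m 0) m = true := by
        simp only [pvPx, decide_eq_true_eq]
      have hp' : pvPx l (l[m]?.getD 0) m = true := hp
      simp [hp']
    · rw [PySem.Dict.getD_insert_of_ne _ _ _ (fun hc => h hc.symm), ih x]
      have hp : pvPx l x m = false := by
        simp only [pvPx, decide_eq_false_iff_not]
        exact h
      simp [hp]

theorem pvRank_eq (l : List Int) (i : Nat) :
    pvRank l i = (pvS l).countP (fun v => decide (l.getD i 0 < v))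
      + (List.range i).countP (pvPx l (l.getD i 0)) := by
  rw [pvRank, (pvS_perm l).countP_eq]
  rfl

theorem pvPosLt (l : List Int) (i : Nat) (hi : i < l.length) :
    (List.range i).countP (pvPx l (l.getD i 0)) < (pvS l).count (l.getD i 0) := by
  have hp : pvPx l (l.getD i 0) i = true := by simp [pvPx]
  have h := pvRangeFilterPos (pvPx l (l.getD i 0)) l.length i hi hp
  have hlt := (List.getElem?_eq_some_iff.mp h).1
  rw [← List.countP_eq_length_filter, pvGetCount] at hlt
  rw [(pvS_perm l).count_eq]
  exact hlt

theorem pvRankLt (l : List Int) (i : Nat) (hi : i < l.length) :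
    pvRank l i < l.length := by
  have h1 := pvPosLt l i hi
  have h2 := pvCountSplit (pvS l) (l.getD i 0)
  have h3 : (pvS l).countP (fun v => decide (l.getD i 0 ≤ v)) ≤ (pvS l).length :=
    List.countP_le_length
  have h4 : (pvS l).length = l.length := (pvS_perm l).length_eq
  rw [pvRank_eq]
  omega

theorem pvRankVal (l : List Int) (i : Nat) (hi : i < l.length) :
    (pvS l)[pvRank l i]? = some (l.getD i 0) := by
  have hlt : pvRank l i < (pvS l).length := by
    rw [(pvS_perm l).length_eq]; exact pvRankLt l i hi
  rw [List.getElem?_eq_getElem hlt]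
  congr 1
  rw [pvChar l _ hlt]
  have h1 := pvPosLt l i hi
  rw [pvRank_eq]
  omega

theorem pvRankInj (l : List Int) (i i' : Nat) (hi : i < l.length) (hi' : i' < l.length)
    (h : pvRank l i = pvRank l i') : i = i' := by
  have hv : l.getD i 0 = l.getD i' 0 := by
    have h1 := pvRankVal l i hi
    have h2 := pvRankVal l i' hi'
    rw [h] at h1
    rw [h2] at h1
    exact (Option.some_inj.mp h1).symm
  have hp : pvPx l (l.getD i 0) i = true := by simp [pvPx]
  have hp' : pvPx l (l.getD i 0) i' = true := by
    simp only [pvPx, decide_eq_true_eq]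
    exact hv.symm
  have g1 := pvRangeFilterPos (pvPx l (l.getD i 0)) l.length i hi hp
  have g2 := pvRangeFilterPos (pvPx l (l.getD i 0)) l.length i' hi' hp'
  have hpos : (List.range i).countP (pvPx l (l.getD i 0))
      = (List.range i').countP (pvPx l (l.getD i 0)) := by
    have e1 := pvRank_eq l i
    have e2 := pvRank_eq l i'
    rw [hv] at e1 ⊢
    omega
  rw [hpos] at g1
  rw [g1] at g2
  exact Option.some_inj.mp g2

theorem pvIdxs_length (l : List Int) (x : Int) :
    (pvIdxs l x).length = (pvS l).count x := by
  rw [pvIdxs, ← List.countP_eq_length_filter, pvGetCount, (pvS_perm l).count_eq]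

theorem pvLoop (l : List Int) (names : List String) :
    ∀ (fuel k : Nat) (d : PySem.Dict Int (List Int)) (layout : List String),
      fuel = min (pvS l).length names.length - k →
      k ≤ min (pvS l).length names.length →
      (∀ x, d.getD x [] = (List.map (fun j : Nat => (j : Int)) (pvIdxs l x)).drop (pvPc l x k)) →
      layout = (List.range l.length).map (fun i => pvCond l names i k) →
      (((((pvS l).drop k).zip (names.drop k)).foldl
          (fun (st : PySem.Dict Int (List Int) × List String) p =>
            if p.1 ≠ 0 then
              let v := st.1.getD p.1 []
              let d' := st.1.insert p.1 (PySem.List.slice v (some 1) none)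
              let v0 := PySem.List.pyGetD v 0 0
              (d', PySem.List.pySetD st.2 v0 p.2)
            else st)
          (d, layout)).2)
        = (List.range l.length).map
            (fun i => pvCond l names i (min (pvS l).length names.length)) := by
  intro fuel
  induction fuel with
  | zero =>
    intro k d layout hfuel hk hd hl
    have hkK : k = min (pvS l).length names.length := by omega
    have hnil : (((pvS l).drop k).zip (names.drop k)) = [] := by
      rcases Nat.le_or_le (pvS l).length names.length with h | h
      · rw [List.drop_eq_nil_of_le (as := pvS l) (by omega)]
        exact List.zip_nil_left
      · rw [List.drop_eq_nil_of_le (as := names) (by omega)]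
        exact List.zip_nil_right
    rw [hnil, List.foldl_nil, ← hkK, hl]
  | succ fuel ih =>
    intro k d layout hfuel hk hd hl
    have hkK : k < min (pvS l).length names.length := by omega
    have hks : k < (pvS l).length := by omega
    have hkn : k < names.length := by omega
    have hln : (pvS l).length = l.length := (pvS_perm l).length_eq
    rw [List.drop_eq_getElem_cons hks, List.drop_eq_getElem_cons hkn,
        List.zip_cons_cons, List.foldl_cons]
    by_cases hx : (pvS l)[k] = 0
    · -- zero pitch: the step is a no-op
      rw [if_neg (by simpa using hx)]
      apply ih (k + 1) d layout (by omega) (by omega)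
      · -- dict invariant unchanged
        intro y
        rw [hd y]
        congr 1
        rw [pvPc, pvPc]
        by_cases hy : y = 0
        · simp [hy]
        · simp only [hy, if_false]
          rw [List.take_add_one, List.getElem?_eq_getElem hks, hx]
          simp only [Option.toList_some, List.count_append, List.count_singleton]
          have : ¬((0:Int) == y) := by simpa using Ne.symm hy
          simp [this]
      · -- layout invariant unchanged
        rw [hl]
        apply List.map_congr_left
        intro i hi
        rw [List.mem_range] at hi
        rw [pvCond, pvCond]
        have hne : ¬(pvRank l i = k ∧ l.getD i 0 ≠ 0) := by
          rintro ⟨h1, h2⟩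
          have := pvRankVal l i hi
          rw [h1, List.getElem?_eq_getElem hks, hx] at this
          exact h2 (Option.some_inj.mp this).symm
        refine if_congr ?_ rfl rfl
        constructor
        · rintro ⟨h1, h2⟩; exact ⟨h1, by omega⟩
        · rintro ⟨h1, h2⟩
          refine ⟨h1, ?_⟩
          have : pvRank l i ≠ k := fun hc => hne ⟨hc, h1⟩
          omega
    · -- nonzero pitch s[k] = x: pop the next index of value x and name it
      rw [if_pos (by simpa using hx)]
      simp only []
      set x := (pvS l)[k] with hxdef
      have hchar := (pvChar l k hks x).mp rfl
      set c := (pvS l).countP (fun v => decide (x < v)) with hc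
      set m := (pvS l).count x with hm
      have hP : pvPc l x k = k - c := by
        rw [pvPc, if_neg hx, pvTakeCount (pvS l) (pvS_pairwise l) k hks x rfl]
      have hMlen : (pvIdxs l x).length = m := pvIdxs_length l x
      have hPm : pvPc l x k < (pvIdxs l x).length := by rw [hP, hMlen]; omega
      have hPm' : pvPc l x k < (List.map (fun j : Nat => (j : Int)) (pvIdxs l x)).length := by
        simpa using hPm
      set P := pvPc l x k with hPdef
      set i0 := (pvIdxs l x)[P]'hPm with hi0
      have hdrop : (List.map (fun j : Nat => (j : Int)) (pvIdxs l x)).drop P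
          = (i0 : Int) :: (List.map (fun j : Nat => (j : Int)) (pvIdxs l x)).drop (P + 1) := by
        rw [List.drop_eq_getElem_cons hPm']
        congr 1
        rw [List.getElem_map, ← hi0]
      have hi0n : i0 < l.length := by
        have : i0 ∈ pvIdxs l x := List.getElem_mem _
        rw [pvIdxs, List.mem_filter, List.mem_range] at this
        exact this.1
      have hi0v : l.getD i0 0 = x := by
        have : i0 ∈ pvIdxs l x := List.getElem_mem _
        rw [pvIdxs, List.mem_filter] at this
        simpa [pvPx] using this.2
      have hrank : pvRank l i0 = k := by
        rw [pvRank_eq, hi0v]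
        have := pvRangeFilterGet (pvPx l x) l.length P i0
          (by rw [← pvIdxs]; exact List.getElem?_eq_getElem hPm)
        rw [this, ← hc]
        omega
      -- the popped head
      rw [hd x, hdrop]
      rw [PySem.List.pyGetD_zero_cons]
      have hset : PySem.List.pySetD layout (i0 : Int) names[k]
          = (List.range l.length).map
              (fun i => pvCond l names i (k + 1)) := by
        rw [PySem.List.pySetD_natCast, hl, pvSetMapRange _ _ _ _ hi0n]
        apply List.map_congr_left
        intro i hi
        rw [List.mem_range] at hi
        by_cases hii : i = i0
        · subst hii
          rw [if_pos rfl, pvCond, if_pos ⟨by rw [hi0v]; exact hx, by omega⟩, hrank,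
              List.getD_eq_getElem _ _ hkn]
        · rw [if_neg hii, pvCond, pvCond]
          have hne : ¬(pvRank l i = k ∧ l.getD i 0 ≠ 0) := by
            rintro ⟨h1, h2⟩
            exact hii (pvRankInj l i i0 hi hi0n (h1.trans hrank.symm))
          refine if_congr ?_ rfl rfl
          constructor
          · rintro ⟨h1, h2⟩; exact ⟨h1, by omega⟩
          · rintro ⟨h1, h2⟩
            refine ⟨h1, ?_⟩
            have : pvRank l i ≠ k := fun hc' => hne ⟨hc', h1⟩
            omega
      rw [hset]
      apply ih (k + 1) _ _ (by omega) (by omega)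
      · -- dict invariant after the pop
        intro y
        by_cases hy : y = x
        · subst hy
          rw [PySem.Dict.getD_insert_self, PySem.List.slice_from_one]
          have hpc1 : pvPc l x (k + 1) = P + 1 := by
            rw [pvPc, if_neg hx, List.take_add_one, List.getElem?_eq_getElem hks,
                List.count_append, hPdef, pvPc, if_neg hx]
            rw [← hxdef]
            simp
          rw [hpc1, List.tail_cons]
        · rw [PySem.Dict.getD_insert_of_ne _ _ _ hy, hd y]
          congr 1
          rw [pvPc, pvPc]
          by_cases hy0 : y = 0
          · simp [hy0]
          · simp only [hy0, if_false]
            rw [List.take_add_one, List.getElem?_eq_getElem hks]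
            simp only [Option.toList_some, List.count_append, List.count_singleton]
            have : ¬((pvS l)[k] == y) := by simpa using fun h => hy h.symm
            simp [this]
      · rfl

-- the three let-bound initial values of A, named for the final assembly
def pvDictInit (l : List Int) : PySem.Dict Int (List Int) :=
  (PySem.List.pyRange 0 (PySem.List.len l) 1).foldl
    (fun d i =>
      let x := PySem.List.pyGetD l i 0
      d.insert x (d.getD x [] ++ [i]))
    PySem.Dict.empty

def pvLayInit (l : List Int) : List String :=
  (PySem.List.pyRange 0 (PySem.List.len l) 1).map (fun _ => "")

def pvNamesA (l : List Int) : List String :=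
  if ((pvS l).filter (fun x => decide (x ≠ 0))).length > 2 then ["One", "Three", "Four", "Two"]
  else ["One", "Two"]

theorem pvNamesA_eq (l : List Int) : pvNamesA l = pvNames l := by
  rw [pvNamesA, pvNames, ← List.countP_eq_length_filter, (pvS_perm l).countP_eq]

theorem pvPc0 (l : List Int) (x : Int) : pvPc l x 0 = 0 := by
  rw [pvPc]; by_cases hx : x = 0 <;> simp [hx]

theorem pvDictInit_getD (l : List Int) (x : Int) :
    (pvDictInit l).getD x [] = List.map (fun j : Nat => (j : Int)) (pvIdxs l x) := by
  have hbridge : pvDictInit l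
      = (List.range l.length).foldl
          (fun (d : PySem.Dict Int (List Int)) (i : Nat) =>
            d.insert (l.getD i 0) (d.getD (l.getD i 0) [] ++ [(i : Int)]))
          PySem.Dict.empty := by
    rw [pvDictInit, PySem.List.len_eq, PySem.List.pyRange_one]
    have : ((l.length : Int) - 0).toNat = l.length := by omega
    rw [this, List.foldl_map]
    congr 1
    funext d k
    simp
  rw [hbridge, pvDictBuild l l.length x]
  rfl

theorem pvLayInit_eq (l : List Int) (names : List String) :
    pvLayInit l = (List.range l.length).map (fun i => pvCond l names i 0) := by
  rw [pvLayInit, PySem.List.len_eq, PySem.List.pyRange_one]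
  have : ((l.length : Int) - 0).toNat = l.length := by omega
  rw [this, List.map_map]
  apply List.map_congr_left
  intro i _
  simp [pvCond]

theorem pvSortedRev (l : List Int) : PySem.List.sorted l (fun x => x) true = pvS l := by
  exact List.Perm.eq_of_pairwise
    (fun a b _ _ h1 h2 => le_antisymm h2 h1)
    (PySem.List.sorted_pairwise_rev l (fun x => x))
    (pvS_pairwise l)
    ((PySem.List.sorted_perm l (fun x => x) true).trans (pvS_perm l).symm)

-- the first-occurrence dict: looking up x gives the index of x's first occurrence

theorem pvFirstFold (s : List Int) : ∀ (k0 : Int) (d : PySem.Dict Int Int) (x : Int),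
    ((PySem.List.enumerate s k0).foldl
        (fun (d : PySem.Dict Int Int) p =>
          if d.contains p.2 then d else d.insert p.2 p.1) d).get? x
      = ((d.get? x).or (Option.map (fun j : Nat => k0 + (j : Int)) (PySem.List.index? s x))) := by
  induction s with
  | nil =>
    intro k0 d x
    simp [PySem.List.enumerate_nil, PySem.List.index?_eq_idxOf?]
  | cons a s ih =>
    intro k0 d x
    rw [PySem.List.enumerate_cons, List.foldl_cons]
    by_cases hc : d.contains a
    · rw [if_pos (by simpa using hc), ih]
      by_cases hax : a = x
      · subst hax
        have : (d.get? a).isSome := by rw [← PySem.Dict.contains_eq_isSome_get?]; exact hc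
        obtain ⟨v, hv⟩ := Option.isSome_iff_exists.mp this
        rw [hv]
        simp
      · rw [PySem.List.index?_cons_of_ne _ (fun h => hax h)]
        cases hd : d.get? x
        · simp only [Option.none_or]
          cases hidx : PySem.List.index? s x
          · rfl
          · simp only [Option.map_some]
            congr 1
            push_cast
            ring
        · simp
    · rw [if_neg (by simpa using hc), ih]
      have hdn : d.get? a = none := by
        cases hd : d.get? a
        · rfl
        · exfalso
          apply hc
          rw [PySem.Dict.contains_eq_isSome_get?, hd]
          rfl
      by_cases hax : a = x
      · subst hax
        rw [hdn, PySem.Dict.get?_insert_self, PySem.List.index?_cons_self]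
        simp
      · rw [PySem.Dict.get?_insert_of_ne _ _ (fun h => hax h.symm),
            PySem.List.index?_cons_of_ne _ (fun h => hax h)]
        cases hd : d.get? x
        · simp only [Option.none_or]
          cases hidx : PySem.List.index? s x
          · rfl
          · simp only [Option.map_some]
            congr 1
            push_cast
            ring
        · simp


theorem pvIdxOf (l : List Int) (x : Int) (hx : x ∈ l) :
    PySem.List.index? (pvS l) x
      = some ((pvS l).countP (fun v => decide (x < v))) := by
  set c := (pvS l).countP (fun v => decide (x < v)) with hc
  have hm : 0 < (pvS l).count x := by
    rw [List.count_pos_iff]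
    exact ((pvS_perm l).mem_iff).mpr hx
  have hcs : c + (pvS l).count x ≤ (pvS l).length := by
    have := pvCountSplit (pvS l) x
    have h2 : (pvS l).countP (fun v => decide (x ≤ v)) ≤ (pvS l).length :=
      List.countP_le_length
    omega
  have hcl : c < (pvS l).length := by omega
  have hgc : (pvS l)[c] = x := by
    rw [pvChar l c hcl x]
    omega
  rw [PySem.List.index?_eq_some_iff]
  refine ⟨(pvS l).take c, (pvS l).drop (c + 1), ?_, ?_, ?_⟩
  · conv_lhs => rw [← List.take_append_drop c (pvS l)]
    rw [List.drop_eq_getElem_cons hcl, hgc]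
  · rw [List.length_take]
    omega
  · intro hmem
    obtain ⟨j, hj, hjx⟩ := List.mem_iff_getElem.mp hmem
    rw [List.getElem_take] at hjx
    have hjc : j < c := by
      have := List.length_take (i := c) (l := pvS l)
      omega
    have := (pvChar l j (by omega) x).mp hjx
    omega


theorem pvTakeCountRange (l : List Int) (x : Int) :
    ∀ (i : Nat), i ≤ l.length → (l.take i).count x = (List.range i).countP (pvPx l x) := by
  intro i
  induction i with
  | zero => simp
  | succ i ih =>
    intro hi
    have hil : i < l.length := by omega
    rw [List.take_add_one, List.getElem?_eq_getElem hil, List.range_succ,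
        List.countP_append, List.count_append, ih (by omega)]
    simp only [Option.toList_some, List.count_singleton, List.countP_cons, List.countP_nil]
    congr 1
    by_cases h : l[i] = x <;> simp [pvPx, h, List.getElem?_eq_getElem hil]


theorem pvBLoop (l : List Int) (names : List String) (firstD : PySem.Dict Int Int)
    (hfirst : ∀ x ∈ l, firstD.getD x 0
      = ((pvS l).countP (fun v => decide (x < v)) : Int)) :
    ∀ (i : Nat), i ≤ l.length →
      (∀ x, ((l.take i).foldl
          (fun (st : PySem.Dict Int Int × List String) x =>
            let r := firstD.getD x 0 + st.1.getD x 0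
            let seen' := st.1.insert x (st.1.getD x 0 + 1)
            (seen', st.2 ++ [if x ≠ 0 ∧ r < PySem.List.len names then
              PySem.List.pyGetD names r "" else ""]))
          (PySem.Dict.empty, [])).1.getD x 0 = ((l.take i).count x : Int)) ∧
      ((l.take i).foldl
          (fun (st : PySem.Dict Int Int × List String) x =>
            let r := firstD.getD x 0 + st.1.getD x 0
            let seen' := st.1.insert x (st.1.getD x 0 + 1)
            (seen', st.2 ++ [if x ≠ 0 ∧ r < PySem.List.len names then
              PySem.List.pyGetD names r "" else ""]))
          (PySem.Dict.empty, [])).2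
        = (List.range i).map (fun j => pvCond l names j names.length) := by
  intro i
  induction i with
  | zero => exact fun _ => ⟨fun x => rfl, rfl⟩
  | succ i ih =>
    intro hi
    have hil : i < l.length := by omega
    obtain ⟨hseen, hlay⟩ := ih (by omega)
    rw [List.take_add_one, List.getElem?_eq_getElem hil] at *
    simp only [Option.toList_some] at *
    rw [List.foldl_append, List.foldl_cons, List.foldl_nil]
    have hgd : l.getD i 0 = l[i] := by
      simp [List.getD_eq_getElem?_getD, List.getElem?_eq_getElem hil]
    have hr : firstD.getD l[i] 0
        + ((l.take i).foldl
          (fun (st : PySem.Dict Int Int × List String) x =>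
            let r := firstD.getD x 0 + st.1.getD x 0
            let seen' := st.1.insert x (st.1.getD x 0 + 1)
            (seen', st.2 ++ [if x ≠ 0 ∧ r < PySem.List.len names then
              PySem.List.pyGetD names r "" else ""]))
          (PySem.Dict.empty, [])).1.getD l[i] 0
        = ((pvRank l i : Nat) : Int) := by
      rw [hseen l[i], hfirst l[i] (List.getElem_mem hil), pvRank_eq, hgd,
          pvTakeCountRange l l[i] i (by omega)]
      push_cast
      ring
    constructor
    · intro x
      by_cases hx : x = l[i]
      · subst hx
        rw [PySem.Dict.getD_insert_self, hseen l[i], List.count_append]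
        simp
      · rw [PySem.Dict.getD_insert_of_ne _ _ _ (fun h => hx h), hseen x, List.count_append]
        have : List.count x [l[i]] = 0 := by
          simp [Ne.symm hx]
        rw [this]
        simp
    · rw [hlay, hr, List.range_succ, List.map_append]
      simp only [List.map_cons, List.map_nil]
      rw [pvCond]
      have hcast : (((pvRank l i : Nat) : Int) < PySem.List.len names)
          ↔ pvRank l i < names.length := by
        rw [PySem.List.len_eq]
        exact_mod_cast Iff.rfl
      by_cases hcnd : l[i] ≠ 0 ∧ pvRank l i < names.length
      · rw [if_pos ⟨hcnd.1, hcast.mpr hcnd.2⟩,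
            if_pos ⟨by rw [hgd]; exact hcnd.1, hcnd.2⟩]
        rw [PySem.List.pyGetD_natCast]
      · rw [if_neg (fun hc => hcnd ⟨hc.1, hcast.mp hc.2⟩),
            if_neg (fun hc => hcnd ⟨by rw [← hgd]; exact hc.1, hc.2⟩)]

-- the first-occurrence dict of B, named for the final assembly
def pvFirstDict (l : List Int) : PySem.Dict Int Int :=
  (PySem.List.enumerate (PySem.List.sorted l (fun x => x) true) 0).foldl
    (fun (d : PySem.Dict Int Int) p =>
      if d.contains p.2 then d else d.insert p.2 p.1)
    PySem.Dict.empty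

theorem pvFirstDict_getD (l : List Int) (x : Int) (hx : x ∈ l) :
    (pvFirstDict l).getD x 0 = ((pvS l).countP (fun v => decide (x < v)) : Int) := by
  rw [pvFirstDict, pvSortedRev]
  rw [PySem.Dict.getD_eq_get?_getD, pvFirstFold (pvS l) 0 PySem.Dict.empty x,
      PySem.Dict.get?_empty, Option.none_or, pvIdxOf l x hx]
  simp

theorem pvB (l : List Int) :
    get_voice_layout_alt l = (List.range l.length).map
      (fun i => pvCond l (pvNames l) i (pvNames l).length) := by
  have hB : get_voice_layout_alt l
      = (l.foldl
          (fun (st : PySem.Dict Int Int × List String) x =>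
            let r := (pvFirstDict l).getD x 0 + st.1.getD x 0
            let seen' := st.1.insert x (st.1.getD x 0 + 1)
            (seen', st.2 ++ [if x ≠ 0 ∧ r < PySem.List.len (pvNames l) then
              PySem.List.pyGetD (pvNames l) r "" else ""]))
          (PySem.Dict.empty, [])).2 := rfl
  have hloop := (pvBLoop l (pvNames l) (pvFirstDict l)
    (fun x hx => pvFirstDict_getD l x hx) l.length (le_refl _)).2
  rw [List.take_length] at hloop
  rw [hB, hloop]

-- ===== VERDICT (by name: the statement is the Claim_ definition above) =====
theorem get_voice_layout_spec : Claim_equal_get_voice_layout := by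
  intro l _
  unfold Spec_get_voice_layout
  have hA : get_voice_layout l
      = ((((pvS l).zip (pvNamesA l)).foldl
          (fun (st : PySem.Dict Int (List Int) × List String) p =>
            if p.1 ≠ 0 then
              let v := st.1.getD p.1 []
              let d' := st.1.insert p.1 (PySem.List.slice v (some 1) none)
              let v0 := PySem.List.pyGetD v 0 0
              (d', PySem.List.pySetD st.2 v0 p.2)
            else st)
          (pvDictInit l, pvLayInit l)).2) := rfl
  have hd0 : ∀ x, (pvDictInit l).getD x []
      = (List.map (fun j : Nat => (j : Int)) (pvIdxs l x)).drop (pvPc l x 0) := by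
    intro x
    rw [pvPc0, List.drop_zero]
    exact pvDictInit_getD l x
  have hmain := pvLoop l (pvNames l) (min (pvS l).length (pvNames l).length) 0
    (pvDictInit l) (pvLayInit l) (by omega) (by omega) hd0 (pvLayInit_eq l (pvNames l))
  rw [List.drop_zero, List.drop_zero] at hmain
  rw [hA, pvNamesA_eq, hmain, pvB]
  apply List.map_congr_left
  intro i hi
  rw [List.mem_range] at hi
  rw [pvCond, pvCond]
  have h1 := pvRankLt l i hi
  have hlen := (pvS_perm l).length_eq
  refine if_congr ?_ rfl rfl
  constructor
  · rintro ⟨a, b⟩; exact ⟨a, by omega⟩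
  · rintro ⟨a, b⟩; exact ⟨a, by omega⟩
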